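-- pv_equiv track=rewrite | github.com/sarahz101/customcipher | playfair-hill-cipher.py | text_to_vectors
-- ===== SOURCE A (Python) =====
-- MOD = 26
--
-- def sanitize_text(text):
--     return "".join([c.upper() for c in text if c.isalpha()])
--
-- def text_to_vectors(text):
--     text = sanitize_text(text)
--     while len(text)%3 != 0:
--         text += 'X'
--     vectors = []
--     for i in range(0,len(text),3):
--         chunk = text[i:i+3]
--         vec = [[(ord(chunk[j]) - 65) % MOD] for j in range(3)]
--         vectors.append(vec)
--     return vectors
-- ===== SOURCE B (Python) =====
-- MOD = 26
--
-- def sanitize_text(text):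
--     return "".join([c.upper() for c in text if c.isalpha()])
--
-- def text_to_vectors(text):
--     s = sanitize_text(text)
--     s += 'X' * ((-len(s)) % 3)
--     nums = [(ord(c) - 65) % MOD for c in s]
--     it = iter(nums)
--     # zip-ing one iterator with itself three times groups consecutive triples
--     return [[[x], [y], [z]] for x, y, z in zip(it, it, it)]
-- ===== Notes on version B (the rewrite author's own statement) =====
-- stated objective: alternative
-- what changed: Replaces the while-loop padding with a closed-form pad of ((-len) % 3) pad characters, maps the whole string to numbers in one flat pass, and groups that flat list into consecutive triples with an iterator zipped with itself, instead of A's index loop over range(0,len,3) with per-chunk slicing and inner range(3) indexing.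
import Mathlib
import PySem

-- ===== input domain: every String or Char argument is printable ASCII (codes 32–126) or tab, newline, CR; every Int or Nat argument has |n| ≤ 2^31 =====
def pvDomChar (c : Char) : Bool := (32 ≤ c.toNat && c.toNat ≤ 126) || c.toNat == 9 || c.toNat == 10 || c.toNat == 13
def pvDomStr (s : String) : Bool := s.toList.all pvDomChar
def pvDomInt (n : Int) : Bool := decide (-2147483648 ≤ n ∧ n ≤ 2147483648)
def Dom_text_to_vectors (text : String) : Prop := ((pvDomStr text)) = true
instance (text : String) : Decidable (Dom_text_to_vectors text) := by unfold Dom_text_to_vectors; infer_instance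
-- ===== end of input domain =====

-- B replaces A's while-loop padding and index/slice chunking loop by a closed-form pad,
-- one flat numeric map and a structural-recursion grouping (objective: alternative).

-- ===== PORT A =====
def pvSanitizeA (text : String) : List Char :=
  (text.toList.filter (fun c => PySem.Chars.isalpha c)).map PySem.Chars.upperChar

def pvPadA (s : List Char) : List Char :=
  if _h : s.length % 3 ≠ 0 then pvPadA (s ++ ['X']) else s
termination_by (3 - s.length % 3) % 3
decreasing_by simp only [List.length_append, List.length_cons, List.length_nil]; omega

def text_to_vectors (text : String) : List (List (List Int)) :=
  let t := pvPadA (pvSanitizeA text)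
  (PySem.List.pyRange 0 (t.length : Int) 3).foldl (fun vectors i =>
    let chunk := PySem.List.slice t (some i) (some (i + 3))
    let vec := (PySem.List.pyRange 0 3 1).map (fun j =>
      [PySem.Int.mod (((PySem.List.pyGetD chunk j 'X').toNat : Int) - 65) 26])
    vectors ++ [vec]) []

-- ===== PORT B =====
def pvSanitizeB (text : String) : List Char :=
  (text.toList.filter (fun c => PySem.Chars.isalpha c)).map PySem.Chars.upperChar

-- exact port of Source B's iterator-triple zip: grouping of consecutive triples
def pvGroup3 : List Int → List (List (List Int))
  | a :: b :: c :: rest => [[a], [b], [c]] :: pvGroup3 rest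
  | _ => []

def text_to_vectors_alt (text : String) : List (List (List Int)) :=
  let s := pvSanitizeB text
  let padded := s ++ List.replicate (PySem.Int.mod (-(s.length : Int)) 3).toNat 'X'
  let nums := padded.map (fun c => PySem.Int.mod ((c.toNat : Int) - 65) 26)
  pvGroup3 nums

-- ===== PRECONDITION & SPEC =====
def Spec_text_to_vectors (text : String) (out : List (List (List Int))) : Prop := out = text_to_vectors_alt text
instance (text : String) (out : List (List (List Int))) : Decidable (Spec_text_to_vectors text out) := by unfold Spec_text_to_vectors; infer_instance

-- ===== CLAIM (what is proved, stated in full; the proofs are below) =====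
def Claim_equal_text_to_vectors : Prop := ∀ (text : String), Dom_text_to_vectors text → Spec_text_to_vectors text (text_to_vectors text)

-- ===== LEMMAS AND PROOFS =====

-- A's vector built from the chunk starting at index i
def pvVecAt (t : List Char) (i : Int) : List (List Int) :=
  (PySem.List.pyRange 0 3 1).map (fun j =>
    [PySem.Int.mod (((PySem.List.pyGetD (PySem.List.slice t (some i) (some (i + 3))) j 'X').toNat : Int) - 65) 26])

lemma pvPadA_eq (s : List Char) : pvPadA s = s ++ List.replicate ((3 - s.length % 3) % 3) 'X' := by
  have h3 : s.length % 3 = 0 ∨ s.length % 3 = 1 ∨ s.length % 3 = 2 := by omega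
  rcases h3 with h | h | h
  · rw [pvPadA]; simp [h]
  · rw [pvPadA, dif_pos (by omega)]
    rw [pvPadA, dif_pos (by simp [List.length_append]; omega)]
    rw [pvPadA, dif_neg (by simp [List.length_append]; omega)]
    simp [h, List.replicate_succ']
  · rw [pvPadA, dif_pos (by omega)]
    rw [pvPadA, dif_neg (by simp [List.length_append]; omega)]
    simp [h, List.replicate_succ']

lemma pvModNeg (n : Nat) : (PySem.Int.mod (-(n : Int)) 3).toNat = (3 - n % 3) % 3 := by
  rw [PySem.Int.mod_eq_emod_of_pos (by norm_num)]
  omega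

lemma pvRange3 (k : Nat) : PySem.List.pyRange 0 ((3 * k : Nat) : Int) 3
    = (List.range k).map (fun t => ((3 * t : Nat) : Int)) := by
  rw [PySem.List.pyRange_of_pos 0 _ (by norm_num)]
  rcases Nat.eq_zero_or_pos k with hk | hk
  · simp [hk]
  · rw [if_pos (by push_cast; omega)]
    have : (((3 * k : Nat) : Int) - 0 + 3 - 1) / 3 = (k : Int) := by push_cast; omega
    rw [this]
    simp only [Int.toNat_natCast]
    apply List.map_congr_left
    intro t _
    push_cast; ring

lemma pvMain (k : Nat) (s : List Char) (h : s.length = 3 * k) :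
    (List.range k).map (fun t => pvVecAt s ((3 * t : Nat) : Int))
      = pvGroup3 (s.map (fun c => PySem.Int.mod ((c.toNat : Int) - 65) 26)) := by
  induction k generalizing s with
  | zero =>
    have : s = [] := List.eq_nil_of_length_eq_zero (by omega)
    simp [this, pvGroup3]
  | succ k ih =>
    match s, h with
    | a :: b :: c :: rest, h =>
      have hr : rest.length = 3 * k := by simp at h; omega
      rw [List.range_succ_eq_map]
      simp only [List.map_cons, List.map_map, Function.comp_def]
      have hr3 : PySem.List.pyRange 0 3 1 = [0, 1, 2] := by decide
      have h0 : pvVecAt (a :: b :: c :: rest) ((3 * 0 : Nat) : Int)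
          = [[PySem.Int.mod ((a.toNat : Int) - 65) 26],
             [PySem.Int.mod ((b.toNat : Int) - 65) 26],
             [PySem.Int.mod ((c.toNat : Int) - 65) 26]] := by
        unfold pvVecAt
        have e0 : ((3 * 0 : Nat) : Int) = ((0 : Nat) : Int) := by norm_num
        have e2 : ((0 : Nat) : Int) + 3 = ((0 : Nat) : Int) + ((3 : Nat) : Int) := by norm_num
        rw [e0, e2, PySem.List.slice_natCast_add]
        have : List.take 3 (List.drop 0 (a :: b :: c :: rest)) = [a, b, c] := by simp
        rw [this, hr3]
        simp [PySem.List.pyGetD, PySem.List.pyGet?, PySem.List.pyIdx?]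
      have hshift : ∀ t : Nat, pvVecAt (a :: b :: c :: rest) ((3 * (t + 1) : Nat) : Int)
          = pvVecAt rest ((3 * t : Nat) : Int) := by
        intro t
        unfold pvVecAt
        have e1 : ((3 * (t + 1) : Nat) : Int) = ((3 * t + 3 : Nat) : Int) := by push_cast; ring
        have e2 : ((3 * t + 3 : Nat) : Int) + 3 = ((3 * t + 3 : Nat) : Int) + ((3 : Nat) : Int) := by norm_num
        have e3 : ((3 * t : Nat) : Int) + 3 = ((3 * t : Nat) : Int) + ((3 : Nat) : Int) := by norm_num
        rw [e1, e2, e3, PySem.List.slice_natCast_add, PySem.List.slice_natCast_add]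
        have hd : List.drop (3 * t + 3) (a :: b :: c :: rest) = List.drop (3 * t) rest := by
          rw [show 3 * t + 3 = 3 + 3 * t from by ring, ← List.drop_drop]
          rfl
        rw [hd]
      simp only [hshift, h0, pvGroup3]
      rw [ih rest hr]

lemma pvSanitize_eq (text : String) : pvSanitizeA text = pvSanitizeB text := rfl

-- ===== VERDICT (by name: the statement is the Claim_ definition above) =====
theorem text_to_vectors_spec : Claim_equal_text_to_vectors := by
  intro text _
  unfold Spec_text_to_vectors text_to_vectors text_to_vectors_alt
  simp only
  set s := pvSanitizeB text with hs
  have hA : pvPadA (pvSanitizeA text) = s ++ List.replicate (PySem.Int.mod (-(s.length : Int)) 3).toNat 'X' := by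
    rw [pvSanitize_eq, pvPadA_eq, pvModNeg]
  set t := s ++ List.replicate (PySem.Int.mod (-(s.length : Int)) 3).toNat 'X' with ht
  rw [hA]
  have hmod : t.length % 3 = 0 := by
    rw [ht, List.length_append, List.length_replicate, pvModNeg]
    omega
  obtain ⟨k, hk⟩ : ∃ k, t.length = 3 * k := ⟨t.length / 3, by omega⟩
  rw [hk, pvRange3 k]
  rw [PySem.List.foldl_append_singleton_eq_map]
  rw [List.nil_append, List.map_map]
  exact pvMain k t hk
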